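-- pv_equiv track=rewrite | github.com/yujinii59/AlgorithmPractice | 프로그래머스/unrated/132265. 롤케이크 자르기/롤케이크 자르기.py | solution
-- ===== SOURCE A (Python) =====
-- from collections import Counter
--
-- def solution(topping):
--     answer = 0
--     counter = Counter(topping)
--     divide = dict()
--     for num in topping:
--         cnt = divide.get(num, 0)
--         divide[num] = cnt + 1
--         if counter[num] > 1:
--             counter[num] -= 1
--         else:
--             del counter[num]
--
--         if len(divide) == len(counter):
--             answer += 1
--     return answer
-- ===== SOURCE B (Python) =====
-- def solution(topping):
--     # precompute suffix distinct counts, then a single forward scan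
--     suffix = [0]
--     seen = set()
--     for x in reversed(topping):
--         seen.add(x)
--         suffix.append(len(seen))
--     suffix.reverse()
--     answer = 0
--     left = set()
--     for x, s in zip(topping, suffix[1:]):
--         left.add(x)
--         if len(left) == s:
--             answer += 1
--     return answer
-- ===== Notes on version B (the rewrite author's own statement) =====
-- stated objective: alternative
-- what changed: Replaces A's single interleaved pass (Counter decremented/deleted in lockstep with a growing prefix dict) by a precompute-then-scan decomposition: a reverse pass builds a table of suffix distinct counts with a set, then a forward pass with a left set compares len(left) against the table entry.
import Mathlib
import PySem

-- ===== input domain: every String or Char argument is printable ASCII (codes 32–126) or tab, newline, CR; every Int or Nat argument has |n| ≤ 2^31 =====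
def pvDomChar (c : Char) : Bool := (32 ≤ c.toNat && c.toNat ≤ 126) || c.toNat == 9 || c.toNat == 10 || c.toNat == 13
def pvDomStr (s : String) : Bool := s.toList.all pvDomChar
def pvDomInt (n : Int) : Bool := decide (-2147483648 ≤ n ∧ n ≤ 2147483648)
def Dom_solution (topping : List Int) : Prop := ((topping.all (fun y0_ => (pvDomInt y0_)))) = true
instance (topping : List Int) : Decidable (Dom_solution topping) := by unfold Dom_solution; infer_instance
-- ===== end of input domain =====

-- B replaces A's single interleaved Counter-decrement pass by a precompute-then-scan
-- decomposition (suffix distinct-count table, then one forward scan); same O(n) cost.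

-- ===== PORT A =====
-- literal port of A: one pass keeping (answer, counter, divide); counter starts as Counter(topping)
def solution (topping : List Int) : Int :=
  ((topping.foldl (fun (st : Int × PySem.Dict Int Int × PySem.Dict Int Int) num =>
      let cnt := st.2.2.getD num 0
      let divide := st.2.2.insert num (cnt + 1)
      let counter := if st.2.1.getD num 0 > 1
        then st.2.1.insert num (st.2.1.getD num 0 - 1)
        else st.2.1.erase num
      let answer := if divide.size = counter.size then st.1 + 1 else st.1
      (answer, counter, divide))
    (0, PySem.Dict.counter topping, PySem.Dict.empty))).1

-- ===== PORT B =====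
-- literal port of B (Source B): reverse pass building the suffix distinct-count table, then a forward scan
def solution_alt (topping : List Int) : Int :=
  let rev := topping.reverse.foldl
      (fun (st : PySem.Set Int × List Int) x =>
        let seen := PySem.Set.add st.1 x
        (seen, st.2 ++ [PySem.Set.len seen]))
      ((PySem.Set.empty : PySem.Set Int), [(0 : Int)])
  let suffix := rev.2.reverse
  ((topping.zip (PySem.List.slice suffix (some 1) none)).foldl
      (fun (st : PySem.Set Int × Int) p =>
        let left := PySem.Set.add st.1 p.1
        (left, if PySem.Set.len left = p.2 then st.2 + 1 else st.2))
      ((PySem.Set.empty : PySem.Set Int), (0 : Int))).2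

-- ===== PRECONDITION & SPEC =====
def Spec_solution (topping : List Int) (out : Int) : Prop := out = solution_alt topping
instance (topping : List Int) (out : Int) : Decidable (Spec_solution topping out) := by unfold Spec_solution; infer_instance

-- ===== CLAIM (what is proved, stated in full; the proofs are below) =====
def Claim_equal_solution : Prop := ∀ (topping : List Int), Dom_solution topping → Spec_solution topping (solution topping)

-- ===== LEMMAS AND PROOFS =====

-- number of distinct elements of a list
def dc (l : List Int) : Nat := l.toFinset.card

-- canonical count of valid cut points, shared reference for both ports
def canon : List Int → List Int → Int
  | _, [] => 0
  | p, x :: r => (if dc (p ++ [x]) = dc r then 1 else 0) + canon (p ++ [x]) r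

theorem ofList_length_eq_dc (l : List Int) : (PySem.Set.ofList l).length = dc l := by
  rw [dc, ← List.toFinset_card_of_nodup (PySem.Set.nodup_ofList l)]
  congr 1
  ext x
  simp [PySem.Set.mem_ofList]

theorem add_ofList (l : List Int) (x : Int) :
    PySem.Set.add (PySem.Set.ofList l) x = PySem.Set.ofList (l ++ [x]) := by
  simp [PySem.Set.ofList_eq_foldl, List.foldl_append]

theorem dc_reverse (l : List Int) : dc l.reverse = dc l := by simp [dc]

theorem dc_reverse_append (l : List Int) (x : Int) :
    dc (l.reverse ++ [x]) = dc (x :: l) := by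
  rw [show l.reverse ++ [x] = (x :: l).reverse by simp, dc_reverse]

-- B's reverse pass, fully characterised
theorem rev_pass (t : List Int) :
    t.reverse.foldl
      (fun (st : PySem.Set Int × List Int) x =>
        let seen := PySem.Set.add st.1 x
        (seen, st.2 ++ [PySem.Set.len seen]))
      ((PySem.Set.empty : PySem.Set Int), [(0 : Int)]) =
    (PySem.Set.ofList t.reverse,
      ((List.range (t.length + 1)).map (fun i => ((dc (t.drop i) : Int)))).reverse) := by
  induction t with
  | nil => rfl
  | cons x t' ih =>
    rw [List.reverse_cons, List.foldl_append, ih]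
    have hlen : (PySem.Set.ofList (t'.reverse ++ [x])).len = (dc (x :: t') : Int) := by
      simp [PySem.Set.len, ofList_length_eq_dc, dc_reverse_append]
    refine Prod.ext ?_ ?_
    · simp [add_ofList]
    · show _ ++ [((PySem.Set.ofList t'.reverse).add x).len] = _
      have hm : (List.range (x :: t').length.succ).map
            (fun i => ((dc ((x :: t').drop i) : Int)))
          = (dc (x :: t') : Int) ::
            (List.range (t'.length + 1)).map (fun i => ((dc (t'.drop i) : Int))) := by
        rw [List.range_succ_eq_map]
        simp [Function.comp]
      simp only [List.length_cons] at hm ⊢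
      rw [hm, List.reverse_cons]
      congr 1
      rw [add_ofList]
      exact congrArg (fun v => [v]) hlen

-- B's forward pass equals the canonical count
theorem fwd_pass (r : List Int) : ∀ (p : List Int) (ans : Int),
    ((r.zip ((List.range r.length).map (fun i => ((dc (r.drop (i + 1)) : Int))))).foldl
      (fun (st : PySem.Set Int × Int) q =>
        let left := PySem.Set.add st.1 q.1
        (left, if PySem.Set.len left = q.2 then st.2 + 1 else st.2))
      (PySem.Set.ofList p, ans)).2 = ans + canon p r := by
  induction r with
  | nil => intro p ans; simp [canon]
  | cons x r' ih =>
    intro p ans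
    have hmap : (List.range (x :: r').length).map
          (fun i => ((dc ((x :: r').drop (i + 1)) : Int)))
        = (dc r' : Int) ::
          (List.range r'.length).map (fun i => ((dc (r'.drop (i + 1)) : Int))) := by
      show (List.range (r'.length + 1)).map _ = _
      rw [List.range_succ_eq_map]
      simp [Function.comp]
    rw [hmap]
    show ((r'.zip _).foldl _
        (PySem.Set.add (PySem.Set.ofList p) x,
          if PySem.Set.len (PySem.Set.add (PySem.Set.ofList p) x) = (dc r' : Int)
          then ans + 1 else ans)).2 = _
    rw [add_ofList]
    have hlen : PySem.Set.len (PySem.Set.ofList (p ++ [x])) = (dc (p ++ [x]) : Int) := by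
      simp [PySem.Set.len, ofList_length_eq_dc]
    rw [hlen, ih]
    show _ = ans + canon p (x :: r')
    rw [canon]
    split_ifs with h h' h'
    · ring
    · exact absurd (by exact_mod_cast h) h'
    · exact absurd (by exact_mod_cast h') h
    · ring

theorem solution_alt_eq_canon (t : List Int) : solution_alt t = canon [] t := by
  unfold solution_alt
  rw [rev_pass]
  simp only [List.reverse_reverse]
  have hslice : PySem.List.slice
        ((List.range (t.length + 1)).map (fun i => ((dc (t.drop i) : Int)))) (some 1) none
      = (List.range t.length).map (fun i => ((dc (t.drop (i + 1)) : Int))) := by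
    rw [PySem.List.slice_from _ (by norm_num)]
    rw [List.range_succ_eq_map]
    simp [Function.comp]
  rw [hslice]
  have := fwd_pass t [] 0
  simpa using this

-- ===== A-side lemmas =====

theorem find?_filter_ne (l : List (Int × Int)) (k x : Int) :
    (l.filter (fun p => !p.1 == k)).find? (fun p => p.1 == x)
      = if x = k then none else l.find? (fun p => p.1 == x) := by
  by_cases hxk : x = k
  · subst hxk
    rw [if_pos rfl]
    induction l with
    | nil => simp
    | cons hd tl ih =>
      by_cases h : hd.1 = x
      · simp [h, ih]
      · simp [h, ih]
  · rw [if_neg hxk]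
    induction l with
    | nil => simp
    | cons hd tl ih =>
      have hkx : (k == x) = false := beq_eq_false_iff_ne.mpr (fun e => hxk e.symm)
      by_cases h : hd.1 = k
      · have h2 : hd.1 ≠ x := by rw [h]; exact fun e => hxk e.symm
        simp [h, hkx, ih]
      · by_cases h2 : hd.1 = x
        · simp [h2, hxk]
        · simp [h, h2, ih]

theorem get?_erase (d : PySem.Dict Int Int) (k x : Int) :
    (d.erase k).get? x = if x = k then none else d.get? x := by
  obtain ⟨items⟩ := d
  simp only [PySem.Dict.erase, PySem.Dict.get?]
  rw [find?_filter_ne]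
  split_ifs <;> rfl

theorem nodup_keys_erase (d : PySem.Dict Int Int) (k : Int) (h : d.keys.Nodup) :
    (d.erase k).keys.Nodup := by
  obtain ⟨items⟩ := d
  simp only [PySem.Dict.erase, PySem.Dict.keys] at *
  exact List.Sublist.nodup (List.Sublist.map _ List.filter_sublist) h

theorem size_eq_keys_length (d : PySem.Dict Int Int) : d.size = d.keys.length := by
  simp [PySem.Dict.size, PySem.Dict.keys]

theorem keys_insert_eq_add (d : PySem.Dict Int Int) (k : Int) (v : Int) :
    (d.insert k v).keys = PySem.Set.add d.keys k := by
  by_cases h : d.contains k = true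
  · rw [PySem.Dict.keys_insert_of_contains d v h, PySem.Set.add]
    have hm : k ∈ d.keys := (PySem.Dict.contains_iff_mem_keys d k).mp h
    rw [if_pos (by simp [PySem.Set.contains, hm])]
  · rw [PySem.Dict.keys_insert_of_not_contains d v (by simpa using h), PySem.Set.add]
    have hm : k ∉ d.keys := fun hm => h ((PySem.Dict.contains_iff_mem_keys d k).mpr hm)
    rw [if_neg (by simp [PySem.Set.contains, hm])]

-- a dict whose lookups are exactly the positive multiplicities of r has dc r entries
theorem size_of_inv (d : PySem.Dict Int Int) (r : List Int)
    (hinv : ∀ x : Int, d.get? x = if 0 < r.count x then some ((r.count x : Int)) else none)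
    (hnd : d.keys.Nodup) : d.size = dc r := by
  rw [size_eq_keys_length, ← List.toFinset_card_of_nodup hnd, dc]
  congr 1
  ext x
  simp only [List.mem_toFinset]
  constructor
  · intro hx
    have := hinv x
    by_cases hc : 0 < r.count x
    · exact List.count_pos_iff.mp hc
    · rw [if_neg hc] at this
      exact absurd hx ((PySem.Dict.get?_eq_none_iff_not_mem_keys d x).mp this)
  · intro hx
    have hc : 0 < r.count x := List.count_pos_iff.mpr hx
    have := hinv x
    rw [if_pos hc] at this
    by_contra hk
    rw [(PySem.Dict.get?_eq_none_iff_not_mem_keys d x).mpr hk] at this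
    simp at this

theorem counter_get? (t : List Int) (x : Int) :
    (PySem.Dict.counter t).get? x
      = if 0 < t.count x then some ((t.count x : Int)) else none := by
  by_cases hx : x ∈ t
  · rw [if_pos (List.count_pos_iff.mpr hx)]
    apply PySem.Dict.get?_of_mem_items _ _ (PySem.Dict.nodup_keys_counter t)
    rw [PySem.Dict.items_counter]
    exact List.mem_map.mpr ⟨x, (PySem.Set.mem_ofList t x).mpr hx, rfl⟩
  · rw [if_neg (by simpa using hx)]
    rw [PySem.Dict.get?_eq_none_iff_not_mem_keys, PySem.Dict.keys_counter, PySem.Set.mem_ofList]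
    exact hx

-- A's loop equals the canonical count, by the counter/divide invariants
theorem a_loop (r : List Int) : ∀ (p : List Int) (ans : Int)
    (counter divide : PySem.Dict Int Int),
    (∀ x : Int, counter.get? x = if 0 < r.count x then some ((r.count x : Int)) else none) →
    counter.keys.Nodup →
    divide.keys = PySem.Set.ofList p →
    ((r.foldl (fun (st : Int × PySem.Dict Int Int × PySem.Dict Int Int) num =>
      let cnt := st.2.2.getD num 0
      let divide := st.2.2.insert num (cnt + 1)
      let counter := if st.2.1.getD num 0 > 1
        then st.2.1.insert num (st.2.1.getD num 0 - 1)
        else st.2.1.erase num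
      let answer := if divide.size = counter.size then st.1 + 1 else st.1
      (answer, counter, divide)) (ans, counter, divide)).1) = ans + canon p r := by
  induction r with
  | nil => intro p ans counter divide _ _ _; simp [canon]
  | cons num r' ih =>
    intro p ans counter divide hinv hnd hdiv
    have hcnt : counter.getD num 0 = ((num :: r').count num : Int) := by
      rw [PySem.Dict.getD_eq_get?_getD, hinv num, if_pos (by simp)]
      rfl
    have hcount : (num :: r').count num = r'.count num + 1 := by simp
    -- new divide keys
    have hdiv' : (divide.insert num (divide.getD num 0 + 1)).keys
        = PySem.Set.ofList (p ++ [num]) := by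
      rw [keys_insert_eq_add, hdiv, add_ofList]
    have hdsize : (divide.insert num (divide.getD num 0 + 1)).size = dc (p ++ [num]) := by
      rw [size_eq_keys_length, hdiv', ofList_length_eq_dc]
    -- the two branches give a counter satisfying the invariant for r'
    by_cases hb : counter.getD num 0 > 1
    · have hgt : 1 < r'.count num + 1 := by
        have : (1 : Int) < ((num :: r').count num : Int) := by rw [← hcnt]; exact hb
        rw [hcount] at this; exact_mod_cast this
      have hpos : 0 < r'.count num := by omega
      have hinv' : ∀ x : Int, (counter.insert num (counter.getD num 0 - 1)).get? x
          = if 0 < r'.count x then some ((r'.count x : Int)) else none := by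
        intro x
        rw [PySem.Dict.get?_insert]
        by_cases hx : x = num
        · subst hx
          rw [if_pos rfl, if_pos hpos, hcnt]
          congr 1
          rw [hcount]; push_cast; ring
        · rw [if_neg hx, hinv x, List.count_cons_of_ne (Ne.symm hx)]
      have hcsize : (counter.insert num (counter.getD num 0 - 1)).size = dc r' :=
        size_of_inv _ r' hinv' (PySem.Dict.nodup_keys_insert _ _ _ hnd)
      simp only [List.foldl_cons, if_pos hb, hdsize, hcsize]
      rw [ih (p ++ [num]) _ _ _ hinv' (PySem.Dict.nodup_keys_insert _ _ _ hnd) hdiv']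
      rw [canon]
      split_ifs <;> ring
    · have hle : ((num :: r').count num : Int) ≤ 1 := by rw [← hcnt]; omega
      have hzero : r'.count num = 0 := by
        rw [hcount] at hle
        have : r'.count num + 1 ≤ 1 := by exact_mod_cast hle
        omega
      have hinv' : ∀ x : Int, (counter.erase num).get? x
          = if 0 < r'.count x then some ((r'.count x : Int)) else none := by
        intro x
        rw [get?_erase]
        by_cases hx : x = num
        · subst hx; rw [if_pos rfl, if_neg (by omega)]
        · rw [if_neg hx, hinv x, List.count_cons_of_ne (Ne.symm hx)]
      have hcsize : (counter.erase num).size = dc r' :=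
        size_of_inv _ r' hinv' (nodup_keys_erase _ _ hnd)
      simp only [List.foldl_cons, if_neg hb, hdsize, hcsize]
      rw [ih (p ++ [num]) _ _ _ hinv' (nodup_keys_erase _ _ hnd) hdiv']
      rw [canon]
      split_ifs <;> ring

theorem solution_eq_canon (t : List Int) : solution t = canon [] t := by
  unfold solution
  have := a_loop t [] 0 (PySem.Dict.counter t) PySem.Dict.empty
    (counter_get? t) (PySem.Dict.nodup_keys_counter t) (by rfl)
  simpa using this

-- ===== VERDICT (by name: the statement is the Claim_ definition above) =====
theorem solution_spec : Claim_equal_solution := by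
  intro topping _
  unfold Spec_solution
  rw [solution_eq_canon, solution_alt_eq_canon]
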